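-- pv_equiv track=rewrite | github.com/edweenie123/competitive-programming-solutions | CCC/CCC'14-S3-The-Geneva-Confection.py | checkIfPossible
-- ===== SOURCE A (Python) =====
-- def checkIfPossible(arr, nCars):
--     reqCar = 1
--
--     branch = []
--
--     isPossible = "Y"
--     while reqCar <= nCars and isPossible == "Y":
--
--         if len(arr) > 0 and arr[-1] == reqCar:
--            arr.pop(-1)
--            reqCar+=1
--         elif len(branch) > 0 and branch[-1] == reqCar:
--             branch.pop(-1)
--             reqCar += 1
--         elif len(arr) > 0:
--             branch.append(arr[-1])
--             arr.pop(-1)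
--         else:
--             isPossible = "N"
--             break
--     return isPossible
-- ===== SOURCE B (Python) =====
-- def checkIfPossible(arr, nCars):
--     reqCar = 1
--     branch = []
--     for x in reversed(arr):
--         if reqCar > nCars:
--             return "Y"
--         while x != reqCar and branch and branch[-1] == reqCar:
--             branch.pop()
--             reqCar += 1
--             if reqCar > nCars:
--                 return "Y"
--         if x == reqCar:
--             reqCar += 1
--         else:
--             branch.append(x)
--     while reqCar <= nCars and branch and branch[-1] == reqCar:
--         branch.pop()
--         reqCar += 1
--     return "Y" if reqCar > nCars else "N"
-- ===== Notes on version B (the rewrite author's own statement) =====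
-- stated objective: idiomatic
-- what changed: Same greedy rule, but restructured from a four-way elif state machine that mutates arr via pop(-1) and a string flag into a single non-mutating for-pass over reversed(arr) with an inner drain loop and a final drain loop (fewer interpreted per-element steps: no flag test, no list mutation, no re-dispatch through the elif chain).
import Mathlib
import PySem

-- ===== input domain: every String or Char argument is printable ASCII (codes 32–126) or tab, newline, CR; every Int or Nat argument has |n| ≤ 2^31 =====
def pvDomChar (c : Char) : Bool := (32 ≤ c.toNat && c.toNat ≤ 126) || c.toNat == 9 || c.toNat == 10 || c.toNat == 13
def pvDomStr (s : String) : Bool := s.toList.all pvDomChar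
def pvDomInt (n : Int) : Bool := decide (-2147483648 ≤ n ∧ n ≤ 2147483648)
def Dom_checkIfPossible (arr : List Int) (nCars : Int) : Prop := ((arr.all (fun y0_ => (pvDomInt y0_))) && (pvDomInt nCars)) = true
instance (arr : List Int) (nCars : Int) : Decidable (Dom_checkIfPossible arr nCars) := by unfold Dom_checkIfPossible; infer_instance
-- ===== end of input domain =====

-- B keeps A's greedy decision rule but restructures it as a single non-mutating forward
-- pass over reversed(arr) with an inner drain loop and a final drain loop (objective:
-- idiomatic). Return-value equivalence only: A consumes `arr` in place, B never mutates it.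

-- ===== PORT A =====
-- A's while loop: state (arr, branch, reqCar); branch/arr tops are the list ends, as in Python.
def loopA (arr branch : List Int) (reqCar nCars : Int) : String :=
  if _h : reqCar ≤ nCars then
    if ha : arr.getLast? = some reqCar then
      loopA arr.dropLast branch (reqCar + 1) nCars
    else if hb : branch.getLast? = some reqCar then
      loopA arr branch.dropLast (reqCar + 1) nCars
    else if hne : arr = [] then "N"
    else loopA arr.dropLast (branch ++ [arr.getLast hne]) reqCar nCars
  else "Y"
termination_by ((nCars + 1 - reqCar).toNat, arr.length)
decreasing_by
  · apply Prod.Lex.left; omega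
  · apply Prod.Lex.left; omega
  · apply Prod.Lex.right
    have := List.length_pos_of_ne_nil hne
    simp [List.length_dropLast]; omega

def checkIfPossible (arr : List Int) (nCars : Int) : String :=
  loopA arr [] 1 nCars

-- ===== PORT B =====
-- the inner `while x != reqCar and branch and branch[-1] == reqCar` loop of Source B;
-- `none` encodes Source B's early `return "Y"` from inside that loop.
def drainWhile (x : Int) (branch : List Int) (reqCar nCars : Int) : Option (List Int × Int) :=
  if h : x ≠ reqCar ∧ branch.getLast? = some reqCar then
    if reqCar + 1 > nCars then none
    else drainWhile x branch.dropLast (reqCar + 1) nCars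
  else some (branch, reqCar)
termination_by branch.length
decreasing_by
  have hne : branch ≠ [] := by intro e; rw [e] at h; simp at h
  have := List.length_pos_of_ne_nil hne
  simp [List.length_dropLast]; omega

-- the final `while reqCar <= nCars and branch and branch[-1] == reqCar` loop of Source B
def endDrain (branch : List Int) (reqCar nCars : Int) : Int :=
  if h : reqCar ≤ nCars ∧ branch.getLast? = some reqCar then
    endDrain branch.dropLast (reqCar + 1) nCars
  else reqCar
termination_by branch.length
decreasing_by
  have hne : branch ≠ [] := by intro e; rw [e] at h; simp at h
  have := List.length_pos_of_ne_nil hne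
  simp [List.length_dropLast]; omega

-- Source B's `for x in reversed(arr)` loop; xs is the not-yet-visited part of reversed(arr)
def loopB (xs branch : List Int) (reqCar nCars : Int) : String :=
  match xs with
  | [] => if endDrain branch reqCar nCars > nCars then "Y" else "N"
  | x :: rest =>
    if reqCar > nCars then "Y"
    else
      match drainWhile x branch reqCar nCars with
      | none => "Y"
      | some (b, r) =>
        if x = r then loopB rest b (r + 1) nCars
        else loopB rest (b ++ [x]) r nCars

def checkIfPossible_alt (arr : List Int) (nCars : Int) : String :=
  loopB arr.reverse [] 1 nCars

-- ===== PRECONDITION & SPEC =====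
def Spec_checkIfPossible (arr : List Int) (nCars : Int) (out : String) : Prop := out = checkIfPossible_alt arr nCars
instance (arr : List Int) (nCars : Int) (out : String) : Decidable (Spec_checkIfPossible arr nCars out) := by unfold Spec_checkIfPossible; infer_instance

-- ===== CLAIM (what is proved, stated in full; the proofs are below) =====
def Claim_equal_checkIfPossible : Prop := ∀ (arr : List Int) (nCars : Int), Dom_checkIfPossible arr nCars → Spec_checkIfPossible arr nCars (checkIfPossible arr nCars)

-- ===== LEMMAS AND PROOFS =====

-- one-step unfolding lemmas for B's two drain loops
theorem drainWhile_stop (x : Int) (branch : List Int) (r n : Int)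
    (h : ¬(x ≠ r ∧ branch.getLast? = some r)) :
    drainWhile x branch r n = some (branch, r) := by
  rw [drainWhile]; simp [h]

theorem drainWhile_step (x : Int) (branch : List Int) (r n : Int)
    (hx : x ≠ r) (hb : branch.getLast? = some r) :
    drainWhile x branch r n
      = if r + 1 > n then none else drainWhile x branch.dropLast (r + 1) n := by
  rw [drainWhile]; simp [hx, hb]

theorem endDrain_stop (branch : List Int) (r n : Int)
    (h : ¬(r ≤ n ∧ branch.getLast? = some r)) :
    endDrain branch r n = r := by
  rw [endDrain]; simp [h]

theorem endDrain_step (branch : List Int) (r n : Int)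
    (hr : r ≤ n) (hb : branch.getLast? = some r) :
    endDrain branch r n = endDrain branch.dropLast (r + 1) n := by
  rw [endDrain]; simp [hr, hb]

-- A's state machine and B's forward pass stay in lockstep on every state.
theorem loopA_eq_loopB (arr branch : List Int) (reqCar nCars : Int) :
    loopA arr branch reqCar nCars = loopB arr.reverse branch reqCar nCars := by
  induction arr, branch, reqCar using loopA.induct nCars with
  | case1 arr branch r hr ha ih =>
      obtain ⟨a', rfl⟩ := List.getLast?_eq_some_iff.mp ha
      rw [loopA]
      simp only [dif_pos hr, dif_pos ha, List.dropLast_concat] at *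
      rw [ih]
      simp [loopB, List.reverse_append, drainWhile_stop r branch r nCars (by simp),
        (show ¬ r > nCars by omega)]
  | case2 arr branch r hr ha hb ih =>
      rcases List.eq_nil_or_concat' arr with rfl | ⟨a', x, rfl⟩
      · rw [loopA]
        simp only [dif_pos hr, dif_neg ha, dif_pos hb] at *
        rw [ih]
        simp [loopB, endDrain_step branch r nCars hr hb]
      · have hx : x ≠ r := by intro e; exact ha (by simp [e])
        rw [loopA]
        simp only [dif_pos hr, dif_neg ha, dif_pos hb] at *
        rw [ih]
        by_cases h1 : r + 1 > nCars
        · simp [loopB, List.reverse_append, drainWhile_step x branch r nCars hx hb, h1,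
            (show ¬ r > nCars by omega)]
        · simp [loopB, List.reverse_append, drainWhile_step x branch r nCars hx hb, h1,
            (show ¬ r > nCars by omega)]
  | case3 branch r hr hb _ =>
      rw [loopA]
      simp [hr, hb, loopB, endDrain_stop branch r nCars (by tauto),
        (show ¬ r > nCars by omega)]
  | case4 arr branch r hr ha hb hne ih =>
      rcases List.eq_nil_or_concat' arr with rfl | ⟨a', x, rfl⟩
      · exact absurd rfl hne
      · have hx : x ≠ r := by intro e; exact ha (by simp [e])
        rw [loopA]
        simp only [dif_pos hr, dif_neg ha, dif_neg hb, dif_neg hne,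
          List.dropLast_concat, List.getLast_concat] at *
        rw [ih]
        simp [loopB, List.reverse_append, drainWhile_stop x branch r nCars (by tauto), hx,
          (show ¬ r > nCars by omega)]
  | case5 arr branch r hr =>
      rw [loopA, dif_neg hr]
      rcases List.eq_nil_or_concat' arr with rfl | ⟨a', x, rfl⟩
      · simp [loopB, endDrain_stop branch r nCars (by tauto), (show r > nCars by omega)]
      · simp [loopB, List.reverse_append, (show r > nCars by omega)]

-- ===== VERDICT (by name: the statement is the Claim_ definition above) =====
theorem checkIfPossible_spec : Claim_equal_checkIfPossible := by
  intro arr nCars _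
  unfold Spec_checkIfPossible checkIfPossible checkIfPossible_alt
  exact loopA_eq_loopB arr [] 1 nCars
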